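-- pv_equiv track=rewrite | github.com/sajjadm624/Quarantined-Days-Problem-Solving | Number/Happy Numbers.py | print_happy_number
-- ===== SOURCE A (Python) =====
-- def get_digits(number):
-- 	digits = []
-- 	while number:
-- 		digits.append(number % 10)
-- 		number //= 10
-- 	digits.reverse()
-- 	return digits
--
-- def is_happy_number(number):
-- 	previous_numbers = []
-- 	while True:
-- 		digits = get_digits(number)
-- 		sum_of_squared_digits = sum(list(map(lambda x: x **2, digits)))
-- 		if sum_of_squared_digits == 1:
-- 			return True
-- 		elif sum_of_squared_digits in previous_numbers:
-- 			return False
-- 		else: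
-- 			number = sum_of_squared_digits
-- 			previous_numbers.append(number)
--
-- def print_happy_number(number):
-- 	happy_numbers = []
-- 	count = 0
-- 	while count < 8:
-- 		if is_happy_number(number):
-- 			happy_numbers.append(number)
-- 			count += 1
-- 		number += 1
-- 	return happy_numbers
-- ===== SOURCE B (Python) =====
-- def print_happy_number(number):
--     def step(n):
--         s = 0
--         while n:
--             d = n % 10
--             s += d * d
--             n //= 10
--         return s
--
--     def is_happy(n):
--         slow = step(n)
--         fast = step(step(n))
--         while fast != 1 and slow != fast:
--             slow = step(slow)
--             fast = step(step(fast))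
--         return fast == 1
--
--     happy_numbers = []
--     while len(happy_numbers) < 8:
--         if is_happy(number):
--             happy_numbers.append(number)
--         number += 1
--     return happy_numbers
-- ===== Notes on version B (the rewrite author's own statement) =====
-- stated objective: alternative
-- what changed: is_happy_number is rewritten with Floyd's tortoise-and-hare cycle detection over the sum-of-squared-digits step (two moving values, O(1) extra space) instead of storing and scanning a growing list of previously seen sums; the digit loop accumulates the square sum directly instead of building, reversing and mapping a digit list.
import Mathlib
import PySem

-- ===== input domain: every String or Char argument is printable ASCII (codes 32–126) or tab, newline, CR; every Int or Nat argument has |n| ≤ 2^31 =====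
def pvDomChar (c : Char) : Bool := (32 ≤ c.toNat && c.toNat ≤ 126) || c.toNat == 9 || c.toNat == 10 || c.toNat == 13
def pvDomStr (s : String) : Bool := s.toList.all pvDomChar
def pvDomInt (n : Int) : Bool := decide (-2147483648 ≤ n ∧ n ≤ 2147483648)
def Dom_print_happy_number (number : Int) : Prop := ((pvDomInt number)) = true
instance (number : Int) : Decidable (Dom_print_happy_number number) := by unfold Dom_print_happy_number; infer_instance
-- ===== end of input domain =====

-- B replaces A's seen-list cycle detection inside is_happy_number by Floyd's tortoise-and-hare over the
-- sum-of-squared-digits step (alternative algorithm, O(1) extra space; not measured faster).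
-- All fuel parameters below are totality guards only: they are never exhausted on inputs admitted by Pre_.

-- ===== PORT A =====
-- get_digits: while number: digits.append(number % 10); number //= 10; then digits.reverse()
def pvGdLoop : Nat → Int → List Int → List Int
  | 0, _, ds => ds
  | f+1, n, ds =>
      if n = 0 then ds
      else pvGdLoop f (PySem.Int.floordiv n 10) (ds ++ [PySem.Int.mod n 10])

def get_digits (number : Int) : List Int :=
  (pvGdLoop (number.natAbs + 1) number []).reverse

-- sum(list(map(lambda x: x ** 2, digits)))
def pvSumSq (digits : List Int) : Int := (digits.map (fun x => x * x)).foldl (· + ·) 0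

-- is_happy_number's 'while True' loop over (number, previous_numbers)
def pvIhLoop : Nat → Int → List Int → Bool
  | 0, _, _ => false
  | f+1, number, prev =>
      let s := pvSumSq (get_digits number)
      if s = 1 then true
      else if s ∈ prev then false
      else pvIhLoop f s (prev ++ [s])

def is_happy_number (number : Int) : Bool := pvIhLoop 1000 number []

-- print_happy_number's 'while count < 8' loop
def pvOuterA : Nat → Int → List Int → Int → List Int
  | 0, _, happy, _ => happy
  | f+1, number, happy, count =>
      if count < 8 then
        if is_happy_number number then pvOuterA f (number + 1) (happy ++ [number]) (count + 1)
        else pvOuterA f (number + 1) happy count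
      else happy

def print_happy_number (number : Int) : List Int := pvOuterA 2147483648 number [] 0

-- ===== PORT B =====
-- step: s = 0; while n: d = n % 10; s += d * d; n //= 10; return s
def pvStepLoop : Nat → Int → Int → Int
  | 0, _, s => s
  | f+1, n, s =>
      if n = 0 then s
      else
        let d := PySem.Int.mod n 10
        pvStepLoop f (PySem.Int.floordiv n 10) (s + d * d)

def pvStep (n : Int) : Int := pvStepLoop (n.natAbs + 1) n 0

-- is_happy: Floyd's tortoise and hare over pvStep
def pvFloyd : Nat → Int → Int → Bool
  | 0, _, _ => false
  | f+1, slow, fast =>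
      if fast ≠ 1 ∧ slow ≠ fast then pvFloyd f (pvStep slow) (pvStep (pvStep fast))
      else decide (fast = 1)

def pvIsHappyAlt (n : Int) : Bool := pvFloyd 1000 (pvStep n) (pvStep (pvStep n))

-- 'while len(happy_numbers) < 8' loop
def pvOuterB : Nat → Int → List Int → List Int
  | 0, _, happy => happy
  | f+1, number, happy =>
      if happy.length < 8 then
        if pvIsHappyAlt number then pvOuterB f (number + 1) (happy ++ [number])
        else pvOuterB f (number + 1) happy
      else happy

def print_happy_number_alt (number : Int) : List Int := pvOuterB 2147483648 number []

-- ===== PRECONDITION & SPEC =====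
-- Pre_ excludes negative starts: there Python's get_digits loops forever (number //= 10 stalls at -1), so A never returns.
def Pre_print_happy_number (number : Int) : Prop := 0 ≤ number
instance (number : Int) : Decidable (Pre_print_happy_number number) := by
  unfold Pre_print_happy_number; infer_instance

def pvWitness_print_happy_number : Int := 7

def Spec_print_happy_number (number : Int) (out : List Int) : Prop := out = print_happy_number_alt number
instance (number : Int) (out : List Int) : Decidable (Spec_print_happy_number number out) := by
  unfold Spec_print_happy_number; infer_instance

-- ===== CLAIM (what is proved, stated in full; the proofs are below) =====
def Claim_equal_print_happy_number : Prop := ∀ (number : Int), Dom_print_happy_number number → Pre_print_happy_number number → Spec_print_happy_number number (print_happy_number number)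

-- ===== LEMMAS AND PROOFS =====

theorem pvSumSq_nil : pvSumSq [] = 0 := rfl

theorem pvFoldlAdd : ∀ (l : List Int) (a : Int), l.foldl (· + ·) a = a + l.foldl (· + ·) 0 := by
  intro l
  induction l with
  | nil => intro a; simp
  | cons x xs ih =>
      intro a
      show xs.foldl (· + ·) (a + x) = a + xs.foldl (· + ·) (0 + x)
      rw [ih (a + x), ih (0 + x)]; ring

theorem pvSumSq_append (l : List Int) (d : Int) :
    pvSumSq (l ++ [d]) = pvSumSq l + d * d := by
  simp only [pvSumSq, List.map_append, List.foldl_append, List.map_cons, List.map_nil,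
    List.foldl_cons, List.foldl_nil]

theorem pvSumSq_cons (x : Int) (xs : List Int) : pvSumSq (x :: xs) = x * x + pvSumSq xs := by
  simp only [pvSumSq, List.map_cons, List.foldl_cons]
  rw [pvFoldlAdd _ (0 + x * x)]; ring

theorem pvSumSq_reverse (l : List Int) : pvSumSq l.reverse = pvSumSq l := by
  induction l with
  | nil => rfl
  | cons x xs ih =>
      rw [List.reverse_cons, pvSumSq_append, ih, pvSumSq_cons]; ring

theorem pvStepLoop_gdLoop : ∀ (f : Nat) (n acc : Int) (ds : List Int),
    pvStepLoop f n acc = acc + (pvSumSq (pvGdLoop f n ds) - pvSumSq ds) := by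
  intro f
  induction f with
  | zero => intro n acc ds; simp [pvStepLoop, pvGdLoop]
  | succ f ih =>
      intro n acc ds
      by_cases h : n = 0
      · simp [pvStepLoop, pvGdLoop, h]
      · simp only [pvStepLoop, pvGdLoop, if_neg h]
        rw [ih (PySem.Int.floordiv n 10) _ (ds ++ [PySem.Int.mod n 10]), pvSumSq_append ds]
        ring

theorem pvSumSq_get_digits (n : Int) : pvSumSq (get_digits n) = pvStep n := by
  rw [get_digits, pvSumSq_reverse, pvStep, pvStepLoop_gdLoop (n.natAbs + 1) n 0 []]
  simp [pvSumSq_nil]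

theorem pvStepLoop_le : ∀ (f : Nat) (n acc : Int), acc ≤ pvStepLoop f n acc := by
  intro f
  induction f with
  | zero => intro n acc; simp [pvStepLoop]
  | succ f ih =>
      intro n acc
      by_cases h : n = 0
      · simp [pvStepLoop, h]
      · simp only [pvStepLoop, if_neg h]
        calc acc ≤ acc + PySem.Int.mod n 10 * PySem.Int.mod n 10 := by
              nlinarith [mul_self_nonneg (PySem.Int.mod n 10)]
          _ ≤ _ := ih _ _

theorem pvStep_nonneg (n : Int) : 0 ≤ pvStep n := pvStepLoop_le _ n 0

theorem pvStepLoop_bound : ∀ (k f : Nat) (n acc : Int), 0 ≤ n → n < 10 ^ k →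
    pvStepLoop f n acc ≤ acc + 81 * k := by
  intro k
  induction k with
  | zero =>
      intro f n acc h0 h1
      have hn : n = 0 := by omega
      cases f <;> simp [pvStepLoop, hn]
  | succ k ih =>
      intro f n acc h0 h1
      cases f with
      | zero => simp [pvStepLoop]; positivity
      | succ f =>
          by_cases h : n = 0
          · simp [pvStepLoop, h]; positivity
          · simp only [pvStepLoop, if_neg h]
            have hmod : PySem.Int.mod n 10 = n % 10 :=
              PySem.Int.mod_eq_emod_of_pos (by norm_num)
            have hdiv : PySem.Int.floordiv n 10 = n / 10 :=
              PySem.Int.floordiv_eq_ediv_of_pos (by norm_num)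
            have hd0 : 0 ≤ n % 10 := Int.emod_nonneg n (by norm_num)
            have hd9 : n % 10 < 10 := Int.emod_lt_of_pos n (by norm_num)
            have hq0 : 0 ≤ n / 10 := Int.ediv_nonneg h0 (by norm_num)
            have hqk : n / 10 < 10 ^ k := by
              have h10 : n < 10 ^ (k + 1) := h1
              rw [pow_succ] at h10
              omega
            rw [hmod, hdiv]
            have hrec := ih f (n / 10) (acc + (n % 10) * (n % 10)) hq0 hqk
            have hdd : (n % 10) * (n % 10) ≤ 81 := by nlinarith
            calc pvStepLoop f (n / 10) (acc + (n % 10) * (n % 10))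
                ≤ acc + (n % 10) * (n % 10) + 81 * k := hrec
              _ ≤ acc + 81 * (k + 1 : Nat) := by push_cast; nlinarith

theorem pvStep_bound (n : Int) (h0 : 0 ≤ n) (h1 : n < 10 ^ 10) : pvStep n ≤ 810 := by
  have h := pvStepLoop_bound 10 (n.natAbs + 1) n 0 h0 h1
  unfold pvStep
  norm_num at h
  exact h

-- the two is_happy loops after their identical first move (s = sum of squared digits of the start)
def pvContA (s : Int) : Bool := if s = 1 then true else pvIhLoop 999 s [s]
def pvContB (s : Int) : Bool := pvFloyd 1000 s (pvStep s)

theorem pvIhLoop_1000 (n : Int) : pvIhLoop 1000 n [] = pvContA (pvStep n) := by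
  have h : pvIhLoop 1000 n [] =
      (if pvSumSq (get_digits n) = 1 then true
       else if pvSumSq (get_digits n) ∈ ([] : List Int) then false
       else pvIhLoop 999 (pvSumSq (get_digits n)) ([] ++ [pvSumSq (get_digits n)])) := rfl
  rw [h, pvSumSq_get_digits, pvContA]
  simp

theorem pvStep_le_243 (u : Int) (h0 : 0 ≤ u) (h1 : u ≤ 243) : pvStep u ≤ 243 := by
  have h := pvStepLoop_bound 3 (u.natAbs + 1) u 0 h0 (by norm_num; omega)
  unfold pvStep
  norm_num at h
  exact h

-- an entry s > 243 in previous_numbers can never be matched again once the current value is ≤ 243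
theorem pvIhLoop_drop : ∀ (f : Nat) (u s : Int) (xs : List Int), 0 ≤ u → u ≤ 243 → 243 < s →
    pvIhLoop f u (s :: xs) = pvIhLoop f u xs := by
  intro f
  induction f with
  | zero => intro u s xs _ _ _; rfl
  | succ f ih =>
      intro u s xs h0 h1 hs
      have hv : pvSumSq (get_digits u) = pvStep u := pvSumSq_get_digits u
      have hv0 : 0 ≤ pvStep u := pvStep_nonneg u
      have hv243 : pvStep u ≤ 243 := pvStep_le_243 u h0 h1
      show (if pvSumSq (get_digits u) = 1 then true
            else if pvSumSq (get_digits u) ∈ (s :: xs) then false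
            else pvIhLoop f (pvSumSq (get_digits u)) ((s :: xs) ++ [pvSumSq (get_digits u)])) =
           (if pvSumSq (get_digits u) = 1 then true
            else if pvSumSq (get_digits u) ∈ xs then false
            else pvIhLoop f (pvSumSq (get_digits u)) (xs ++ [pvSumSq (get_digits u)]))
      rw [hv]
      have hne : pvStep u ≠ s := by omega
      by_cases h1' : pvStep u = 1
      · rw [if_pos h1', if_pos h1']
      · rw [if_neg h1', if_neg h1']
        have hmem : (pvStep u ∈ s :: xs) ↔ (pvStep u ∈ xs) := by
          simp [List.mem_cons, hne]
        by_cases hm : pvStep u ∈ xs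
        · rw [if_pos (hmem.mpr hm), if_pos hm]
        · rw [if_neg (fun h => hm (hmem.mp h)), if_neg hm]
          rw [List.cons_append]
          exact ih (pvStep u) s (xs ++ [pvStep u]) hv0 hv243 hs

set_option maxRecDepth 100000 in
set_option maxHeartbeats 4000000 in
theorem pvCont_eq_lo : ∀ k ∈ List.range 244, pvContA (k : Int) = pvContB (k : Int) := by decide

set_option maxRecDepth 100000 in
set_option maxHeartbeats 4000000 in
theorem pvTbl_eq : ∀ k ∈ List.range 244,
    (if (k : Int) = 1 then true else pvIhLoop 998 (k : Int) [(k : Int)]) =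
    (if (k : Int) = 1 then true else pvFloyd 999 (k : Int) (pvStep (pvStep (k : Int)))) := by decide

theorem pvCont_eq_hi (s : Int) (hlo : 243 < s) (hhi : s ≤ 810) : pvContA s = pvContB s := by
  have hs1 : s ≠ 1 := by omega
  have hv : pvSumSq (get_digits s) = pvStep s := pvSumSq_get_digits s
  have hv0 : 0 ≤ pvStep s := pvStep_nonneg s
  have hv243 : pvStep s ≤ 243 := by
    have h := pvStepLoop_bound 3 (s.natAbs + 1) s 0 (by omega) (by norm_num; omega)
    unfold pvStep
    norm_num at h
    exact h
  have hne : pvStep s ≠ s := by omega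
  have hA : pvContA s = (if pvStep s = 1 then true else pvIhLoop 998 (pvStep s) [pvStep s]) := by
    rw [pvContA, if_neg hs1]
    show (if pvSumSq (get_digits s) = 1 then true
          else if pvSumSq (get_digits s) ∈ [s] then false
          else pvIhLoop 998 (pvSumSq (get_digits s)) ([s] ++ [pvSumSq (get_digits s)])) = _
    rw [hv]
    by_cases h1' : pvStep s = 1
    · rw [if_pos h1', if_pos h1']
    · rw [if_neg h1', if_neg h1']
      rw [if_neg (by simp [hne])]
      rw [show ([s] ++ [pvStep s]) = s :: [pvStep s] from rfl,
        pvIhLoop_drop 998 (pvStep s) s [pvStep s] hv0 hv243 hlo]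
  have hB : pvContB s = (if pvStep s = 1 then true else pvFloyd 999 (pvStep s) (pvStep (pvStep (pvStep s)))) := by
    rw [pvContB]
    show (if pvStep s ≠ 1 ∧ s ≠ pvStep s then pvFloyd 999 (pvStep s) (pvStep (pvStep (pvStep s)))
          else decide (pvStep s = 1)) = _
    by_cases h1' : pvStep s = 1
    · rw [if_neg (by simp [h1']), if_pos h1', h1']
      simp
    · rw [if_pos ⟨h1', fun h => hne h.symm⟩, if_neg h1']
  rw [hA, hB]
  obtain ⟨k, hk⟩ : ∃ k : Nat, pvStep s = (k : Int) :=
    ⟨(pvStep s).toNat, (Int.toNat_of_nonneg hv0).symm⟩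
  rw [hk]
  exact pvTbl_eq k (List.mem_range.mpr (by omega))

theorem pvIsHappy_eq (n : Int) (h0 : 0 ≤ n) (h1 : n < 10 ^ 10) :
    is_happy_number n = pvIsHappyAlt n := by
  have hA : is_happy_number n = pvContA (pvStep n) := pvIhLoop_1000 n
  have hB : pvIsHappyAlt n = pvContB (pvStep n) := rfl
  rw [hA, hB]
  have hs0 := pvStep_nonneg n
  have hs1 := pvStep_bound n h0 h1
  by_cases hlo : pvStep n ≤ 243
  · obtain ⟨k, hk⟩ : ∃ k : Nat, pvStep n = (k : Int) :=
      ⟨(pvStep n).toNat, (Int.toNat_of_nonneg hs0).symm⟩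
    rw [hk] at hs1 hlo ⊢
    exact pvCont_eq_lo k (List.mem_range.mpr (by omega))
  · exact pvCont_eq_hi (pvStep n) (by omega) hs1

theorem pvOuter_eq : ∀ (f : Nat) (n : Int) (happy : List Int) (count : Int),
    0 ≤ n → n + f ≤ 10 ^ 10 → count = happy.length →
    pvOuterA f n happy count = pvOuterB f n happy := by
  intro f
  induction f with
  | zero => intro n happy count _ _ _; rfl
  | succ f ih =>
      intro n happy count h0 hf hc
      have hcond : (count < 8) ↔ (happy.length < 8) := by omega
      simp only [pvOuterA, pvOuterB]
      by_cases h8 : happy.length < 8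
      · rw [if_pos (hcond.mpr h8), if_pos h8]
        have hn10 : n < 10 ^ 10 := by push_cast at hf ⊢; omega
        rw [pvIsHappy_eq n h0 hn10]
        by_cases hh : pvIsHappyAlt n = true
        · rw [if_pos hh, if_pos hh]
          exact ih (n + 1) (happy ++ [n]) (count + 1) (by omega)
            (by push_cast at hf ⊢; omega) (by simp [hc])
        · rw [if_neg hh, if_neg hh]
          exact ih (n + 1) happy count (by omega) (by push_cast at hf ⊢; omega) hc
      · rw [if_neg (fun h => h8 (hcond.mp h)), if_neg h8]

-- ===== VERDICT (by name: the statement is the Claim_ definition above) =====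
theorem print_happy_number_spec : Claim_equal_print_happy_number := by
  intro number hdom hpre
  unfold Spec_print_happy_number print_happy_number print_happy_number_alt
  have hd : number ≤ 2147483648 := by
    have := of_decide_eq_true hdom
    exact this.2
  exact pvOuter_eq 2147483648 number [] 0 hpre (by push_cast; omega) (by simp)
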